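-- pv_equiv track=rewrite | github.com/sumankhan30304/RTOS-Project1 | algo.py | deadline_monotonic
-- ===== SOURCE A (Python) =====
-- def deadline_monotonic(tasks):
--     tasks.sort(key=lambda x: x[2])  # Sort tasks based on deadlines
--     current_time = 0
--
--     schedule = []
--     for task in tasks:
--         if current_time + task[1] > task[2]:
--             return schedule, True  # Deadline missed for the task
--
--         schedule.append((current_time, task[1]))
--         current_time += task[1]
--
--     return schedule, False  # No deadline misses
-- ===== SOURCE B (Python) =====
-- def deadline_monotonic(tasks):
--     tasks.sort(key=lambda x: x[2])  # same in-place sort by deadline as the caller expects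
--     # exclusive prefix sums of durations = start time of each task
--     starts = []
--     t = 0
--     for task in tasks:
--         starts.append(t)
--         t += task[1]
--     # locate the first violation, if any
--     cut = len(tasks)
--     missed = False
--     for i, task in enumerate(tasks):
--         if starts[i] + task[1] > task[2]:
--             cut = i
--             missed = True
--             break
--     return [(starts[j], tasks[j][1]) for j in range(cut)], missed
-- ===== Notes on version B (the rewrite author's own statement) =====
-- stated objective: alternative
-- what changed: Replaces A's single accumulate-and-early-return loop with three separate phases: precompute exclusive prefix sums of durations (start times), locate the first deadline violation by index, then build the schedule prefix by comprehension.
import Mathlib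
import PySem

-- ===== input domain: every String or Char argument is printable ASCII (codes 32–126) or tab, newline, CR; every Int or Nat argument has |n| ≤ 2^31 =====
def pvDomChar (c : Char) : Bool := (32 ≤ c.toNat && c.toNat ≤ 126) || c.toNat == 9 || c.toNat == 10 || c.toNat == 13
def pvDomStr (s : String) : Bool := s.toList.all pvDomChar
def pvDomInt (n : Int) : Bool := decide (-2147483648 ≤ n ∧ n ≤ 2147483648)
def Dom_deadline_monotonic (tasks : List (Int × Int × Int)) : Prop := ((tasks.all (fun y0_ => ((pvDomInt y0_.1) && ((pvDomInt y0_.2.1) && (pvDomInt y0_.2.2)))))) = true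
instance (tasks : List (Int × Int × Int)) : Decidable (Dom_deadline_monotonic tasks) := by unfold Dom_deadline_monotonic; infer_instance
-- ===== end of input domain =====

-- B replaces A's single accumulate-and-early-return loop by three phases (prefix sums of
-- durations, locate the first violation, build the schedule prefix). Both Pythons sort the
-- input list IN PLACE (the same mutation); the equivalence proved here is about the return value.

-- ===== PORT A =====
-- A's for-loop with early return: structural recursion over the sorted list,
-- carrying current_time and the schedule built by append.
def dmLoopA : List (Int × Int × Int) → Int → List (Int × Int) → (List (Int × Int)) × Bool
  | [], _, sched => (sched, false)
  | (_, d, dl) :: ts, cur, sched =>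
    if cur + d > dl then (sched, true)
    else dmLoopA ts (cur + d) (sched ++ [(cur, d)])

def deadline_monotonic (tasks : List (Int × Int × Int)) : (List (Int × Int)) × Bool :=
  dmLoopA (PySem.List.sorted tasks (fun x => x.2.2)) 0 []

-- ===== PORT B =====
-- exclusive prefix sums of durations (the `starts` list of Source B)
def dmStarts : List (Int × Int × Int) → Int → List Int
  | [], _ => []
  | (_, d, _) :: ts, t => t :: dmStarts ts (t + d)

-- index of the first violation among (task, start) pairs (Source B's second loop)
def dmFirstViol : List ((Int × Int × Int) × Int) → Option Nat
  | [] => none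
  | ((_, d, dl), s) :: ps => if s + d > dl then some 0 else (dmFirstViol ps).map (· + 1)

def deadline_monotonic_alt (tasks : List (Int × Int × Int)) : (List (Int × Int)) × Bool :=
  let st := PySem.List.sorted tasks (fun x => x.2.2)
  let ps := st.zip (dmStarts st 0)
  match dmFirstViol ps with
  | some i => ((ps.take i).map (fun p => (p.2, p.1.2.1)), true)
  | none => (ps.map (fun p => (p.2, p.1.2.1)), false)

-- ===== PRECONDITION & SPEC =====
def Spec_deadline_monotonic (tasks : List (Int × Int × Int)) (out : (List (Int × Int)) × Bool) : Prop := out = deadline_monotonic_alt tasks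
instance (tasks : List (Int × Int × Int)) (out : (List (Int × Int)) × Bool) : Decidable (Spec_deadline_monotonic tasks out) := by unfold Spec_deadline_monotonic; infer_instance

-- ===== CLAIM (what is proved, stated in full; the proofs are below) =====
def Claim_equal_deadline_monotonic : Prop := ∀ (tasks : List (Int × Int × Int)), Dom_deadline_monotonic tasks → Spec_deadline_monotonic tasks (deadline_monotonic tasks)

-- ===== LEMMAS AND PROOFS =====
-- A's loop, run from start time `cur` with accumulator `sched`, equals B's
-- three-phase computation on the same suffix, prefixed by `sched`.
theorem dmLoopA_eq (ts : List (Int × Int × Int)) (cur : Int) (sched : List (Int × Int)) :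
    dmLoopA ts cur sched =
      (match dmFirstViol (ts.zip (dmStarts ts cur)) with
       | some i => (sched ++ ((ts.zip (dmStarts ts cur)).take i).map (fun p => (p.2, p.1.2.1)), true)
       | none => (sched ++ (ts.zip (dmStarts ts cur)).map (fun p => (p.2, p.1.2.1)), false)) := by
  induction ts generalizing cur sched with
  | nil => simp [dmLoopA, dmStarts, dmFirstViol]
  | cons t ts ih =>
    obtain ⟨r, d, dl⟩ := t
    simp only [dmLoopA, dmStarts, List.zip_cons_cons, dmFirstViol]
    by_cases h : cur + d > dl
    · simp [h]
    · rw [if_neg h, ih (cur + d) (sched ++ [(cur, d)])]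
      cases hv : dmFirstViol (ts.zip (dmStarts ts (cur + d))) with
      | none => simp [h]
      | some i => simp [h]

-- ===== VERDICT (by name: the statement is the Claim_ definition above) =====
theorem deadline_monotonic_spec : Claim_equal_deadline_monotonic := by
  intro tasks _
  unfold Spec_deadline_monotonic deadline_monotonic deadline_monotonic_alt
  rw [dmLoopA_eq]
  cases hv : dmFirstViol ((PySem.List.sorted tasks (fun x => x.2.2)).zip
      (dmStarts (PySem.List.sorted tasks (fun x => x.2.2)) 0)) <;> simp [hv]
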